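-- pv_equiv track=rewrite | github.com/REASY/k8s-ariadne-rs | python/agent/src/k8s_graph_agent/cypher_validator.py | _subquery_has_top_level_return
-- ===== SOURCE A (Python) =====
-- def _subquery_has_top_level_return(text: str) -> bool:
--     upper = text.upper()
--     i = 0
--     depth_paren = 0
--     depth_bracket = 0
--     depth_brace = 0
--     in_string = False
--     in_backtick = False
--     while i < len(text):
--         char = text[i]
--         if in_string:
--             if char == "'" and i + 1 < len(text) and text[i + 1] == "'":
--                 i += 2
--                 continue
--             if char == "'":
--                 in_string = False
--             i += 1
--             continue
--         if in_backtick: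
--             if char == "`":
--                 in_backtick = False
--             i += 1
--             continue
--         if char == "'":
--             in_string = True
--             i += 1
--             continue
--         if char == "`":
--             in_backtick = True
--             i += 1
--             continue
--         if char == "(":
--             depth_paren += 1
--         elif char == ")":
--             depth_paren = max(0, depth_paren - 1)
--         elif char == "[":
--             depth_bracket += 1
--         elif char == "]":
--             depth_bracket = max(0, depth_bracket - 1)
--         elif char == "{":
--             depth_brace += 1
--         elif char == "}":
--             depth_brace = max(0, depth_brace - 1)
--
--         if depth_paren == 0 and depth_bracket == 0 and depth_brace == 0:
--             if upper.startswith("RETURN", i) and _is_word_boundary(text, i, i + 6):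
--                 return True
--         i += 1
--     return False
--
-- def _is_word_boundary(text: str, start: int, end: int) -> bool:
--     if start > 0 and (text[start - 1].isalnum() or text[start - 1] == "_"):
--         return False
--     if end < len(text) and (text[end].isalnum() or text[end] == "_"):
--         return False
--     return True
-- ===== SOURCE B (Python) =====
-- # Two-phase re-implementation: (1) a per-character DFA (_mask_step) classifies each
-- # position as top-level code or not, building a boolean mask; (2) a separate scan
-- # over the mask looks for a qualifying RETURN keyword.
--
-- def _mask_step(state, ch):
--     # state = (mode, depth_paren, depth_bracket, depth_brace)
--     # mode: 0 = code, 1 = in string, 2 = in string just after a quote, 3 = in backtick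
--     mode, dp, db, dc = state
--     if mode == 2:
--         if ch == "'":
--             return (1, dp, db, dc), False  # '' escape: still inside the string
--         mode = 0  # the previous quote closed the string; process ch as code
--     if mode == 1:
--         return ((2 if ch == "'" else 1), dp, db, dc), False
--     if mode == 3:
--         return ((0 if ch == "`" else 3), dp, db, dc), False
--     if ch == "'":
--         return (1, dp, db, dc), False
--     if ch == "`":
--         return (3, dp, db, dc), False
--     if ch == "(":
--         dp += 1
--     elif ch == ")":
--         dp = max(0, dp - 1)
--     elif ch == "[":
--         db += 1
--     elif ch == "]":
--         db = max(0, db - 1)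
--     elif ch == "{":
--         dc += 1
--     elif ch == "}":
--         dc = max(0, dc - 1)
--     return (0, dp, db, dc), dp == 0 and db == 0 and dc == 0
--
--
-- def _is_word_boundary(text: str, start: int, end: int) -> bool:
--     if start > 0 and (text[start - 1].isalnum() or text[start - 1] == "_"):
--         return False
--     if end < len(text) and (text[end].isalnum() or text[end] == "_"):
--         return False
--     return True
--
--
-- def _subquery_has_top_level_return(text: str) -> bool:
--     upper = text.upper()
--     state = (0, 0, 0, 0)
--     mask = []
--     for ch in text:
--         state, bit = _mask_step(state, ch)
--         mask.append(bit)
--     for m in range(len(mask)):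
--         if mask[m] and upper.startswith("RETURN", m) and _is_word_boundary(text, m, m + 6):
--             return True
--     return False
-- ===== Notes on version B (the rewrite author's own statement) =====
-- stated objective: alternative
-- what changed: Replaced A's fused index-jumping while-loop (which skips by 2 on '' escapes and tests RETURN inline) by a two-phase design: a per-character DFA transition function (with an extra 'just saw a quote' state instead of lookahead) folded over the text to build a top-level-code mask, followed by a separate scan over the mask for a qualifying RETURN keyword.
import Mathlib
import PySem

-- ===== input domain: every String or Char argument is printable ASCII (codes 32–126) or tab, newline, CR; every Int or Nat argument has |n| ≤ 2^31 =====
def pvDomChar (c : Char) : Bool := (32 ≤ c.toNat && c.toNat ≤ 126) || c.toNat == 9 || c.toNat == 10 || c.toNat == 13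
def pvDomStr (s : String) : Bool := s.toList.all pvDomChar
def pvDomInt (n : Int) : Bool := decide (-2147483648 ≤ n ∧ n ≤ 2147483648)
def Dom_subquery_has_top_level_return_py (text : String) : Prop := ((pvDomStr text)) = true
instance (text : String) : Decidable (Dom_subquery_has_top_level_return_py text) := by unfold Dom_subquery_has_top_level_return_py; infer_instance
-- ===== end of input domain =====

-- B replaces A's fused index-jumping scan by a per-character DFA building a top-level-code
-- mask, followed by a separate keyword scan (objective: alternative decomposition, same cost).

-- shared helpers (both Pythons call the same module helper _is_word_boundary and the same
-- RETURN-prefix test; loop indices are nonnegative Python ints, so Nat indexing is exact)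
-- char.isalnum() or char == '_' : exact on the printable-ASCII domain
def pvIsWordChar (c : Char) : Bool := PySem.Chars.isalnum c || c == '_'

-- port of _is_word_boundary (start/end arise as i and i+6 with 0 ≤ i)
def pvWordBoundary (cs : List Char) (start fin : Nat) : Bool :=
  if start > 0 && pvIsWordChar (cs.getD (start - 1) ' ') then false
  else if fin < cs.length && pvIsWordChar (cs.getD fin ' ') then false
  else true

-- upper.startswith("RETURN", i) for 0 ≤ i
def pvRetAt (us : List Char) (i : Nat) : Bool :=
  PySem.Chars.startswith (us.drop i) ("RETURN".toList)

-- ===== PORT A =====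
-- the while loop of A; depths are Python ints clamped with max(0, ·), kept as Int
def pvLoopA (cs us : List Char) (i : Nat) (dp db dc : Int) (instr inbt : Bool) : Bool :=
  if hlt : i < cs.length then
    let c := cs[i]
    if instr then
      if c == '\'' && cs[i+1]? == some '\'' then pvLoopA cs us (i+2) dp db dc instr inbt
      else if c == '\'' then pvLoopA cs us (i+1) dp db dc false inbt
      else pvLoopA cs us (i+1) dp db dc instr inbt
    else if inbt then
      if c == '`' then pvLoopA cs us (i+1) dp db dc instr false
      else pvLoopA cs us (i+1) dp db dc instr inbt
    else if c == '\'' then pvLoopA cs us (i+1) dp db dc true inbt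
    else if c == '`' then pvLoopA cs us (i+1) dp db dc instr true
    else
      let dp' := if c == '(' then dp + 1 else if c == ')' then max 0 (dp - 1) else dp
      let db' := if c == '[' then db + 1 else if c == ']' then max 0 (db - 1) else db
      let dc' := if c == '{' then dc + 1 else if c == '}' then max 0 (dc - 1) else dc
      if dp' == 0 && db' == 0 && dc' == 0 && pvRetAt us i && pvWordBoundary cs i (i + 6)
      then true
      else pvLoopA cs us (i+1) dp' db' dc' instr inbt
  else false
termination_by cs.length - i
decreasing_by all_goals omega

def subquery_has_top_level_return_py (text : String) : Bool :=
  let cs := text.toList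
  let us := PySem.Chars.upper cs
  pvLoopA cs us 0 0 0 0 false false

-- ===== PORT B =====
-- the code-mode branch of _mask_step (reached by fallthrough when mode is 0 or 2)
def pvCodeStep (dp db dc : Int) (ch : Char) : (Int × Int × Int × Int) × Bool :=
  if ch == '\'' then ((1, dp, db, dc), false)
  else if ch == '`' then ((3, dp, db, dc), false)
  else
    let dp' := if ch == '(' then dp + 1 else if ch == ')' then max 0 (dp - 1) else dp
    let db' := if ch == '[' then db + 1 else if ch == ']' then max 0 (db - 1) else db
    let dc' := if ch == '{' then dc + 1 else if ch == '}' then max 0 (dc - 1) else dc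
    ((0, dp', db', dc'), dp' == 0 && db' == 0 && dc' == 0)

-- _mask_step: one DFA transition, returns (new state, mask bit)
def pvMaskStep (state : Int × Int × Int × Int) (ch : Char) : (Int × Int × Int × Int) × Bool :=
  match state with
  | (mode, dp, db, dc) =>
    if mode == 2 then
      if ch == '\'' then ((1, dp, db, dc), false)
      else pvCodeStep dp db dc ch
    else if mode == 1 then (((if ch == '\'' then 2 else 1), dp, db, dc), false)
    else if mode == 3 then (((if ch == '`' then 0 else 3), dp, db, dc), false)
    else pvCodeStep dp db dc ch

-- the first for loop: fold _mask_step over the text, collecting the mask bits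
def pvMaskGo (state : Int × Int × Int × Int) : List Char → List Bool
  | [] => []
  | c :: rest => (pvMaskStep state c).2 :: pvMaskGo (pvMaskStep state c).1 rest

def subquery_has_top_level_return_py_alt (text : String) : Bool :=
  let cs := text.toList
  let us := PySem.Chars.upper cs
  let mask := pvMaskGo (0, 0, 0, 0) cs
  (List.range mask.length).any
    (fun m => mask.getD m false && pvRetAt us m && pvWordBoundary cs m (m + 6))

-- ===== PRECONDITION & SPEC =====
def Spec_subquery_has_top_level_return_py (text : String) (out : Bool) : Prop := out = subquery_has_top_level_return_py_alt text
instance (text : String) (out : Bool) : Decidable (Spec_subquery_has_top_level_return_py text out) := by unfold Spec_subquery_has_top_level_return_py; infer_instance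

-- ===== CLAIM (what is proved, stated in full; the proofs are below) =====
def Claim_equal_subquery_has_top_level_return_py : Prop := ∀ (text : String), Dom_subquery_has_top_level_return_py text → Spec_subquery_has_top_level_return_py text (subquery_has_top_level_return_py text)

-- ===== LEMMAS AND PROOFS =====

-- "any qualifying position in this mask suffix, whose first bit sits at absolute index i"
def pvAnyIdx (us cs : List Char) (i : Nat) : List Bool → Bool
  | [] => false
  | b :: bs => (b && pvRetAt us i && pvWordBoundary cs i (i + 6)) || pvAnyIdx us cs (i+1) bs

theorem pvAnyIdx_eq_range_any (us cs : List Char) (bs : List Bool) (i : Nat) :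
    pvAnyIdx us cs i bs =
      (List.range bs.length).any
        (fun m => bs.getD m false && pvRetAt us (i + m) && pvWordBoundary cs (i + m) (i + m + 6)) := by
  induction bs generalizing i with
  | nil => simp [pvAnyIdx]
  | cons b bs ih =>
    simp only [pvAnyIdx, List.length_cons, List.range_succ_eq_map, List.any_cons,
      List.any_map, Function.comp_def, List.getD_cons_zero, List.getD_cons_succ, Nat.add_zero]
    rw [ih (i+1)]
    congr 1
    have hfun : ∀ f g : Nat → Bool, (∀ m, f m = g m) → (List.range bs.length).any f = (List.range bs.length).any g := by
      intro f g h
      induction List.range bs.length with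
      | nil => rfl
      | cons x xs ihx => simp [h, ihx]
    apply hfun
    intro m
    have h1 : i + (m + 1) = i + 1 + m := by omega
    rw [h1]

-- after a quote that closed a string, mode 2 behaves like code mode unless the
-- next character is another quote
theorem pvMaskGo_two_eq_zero (dp db dc : Int) (l : List Char) (h : l.head? ≠ some '\'') :
    pvMaskGo (2, dp, db, dc) l = pvMaskGo (0, dp, db, dc) l := by
  cases l with
  | nil => rfl
  | cons c rest =>
    simp only [List.head?_cons, ne_eq, Option.some.injEq] at h
    simp [pvMaskGo, pvMaskStep, h]

def pvModeOf (instr inbt : Bool) : Int := if instr then 1 else if inbt then 3 else 0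

-- main simulation: A's fused loop from position i equals the mask-then-scan on the suffix
theorem pvLoopA_eq_anyIdx (cs us : List Char) :
    ∀ (k i : Nat) (dp db dc : Int) (instr inbt : Bool),
      cs.length - i ≤ k → (instr = false ∨ inbt = false) →
      pvLoopA cs us i dp db dc instr inbt =
        pvAnyIdx us cs i (pvMaskGo (pvModeOf instr inbt, dp, db, dc) (cs.drop i)) := by
  intro k
  induction k with
  | zero =>
    intro i dp db dc instr inbt hk _
    have hlen : cs.length ≤ i := by omega
    rw [pvLoopA, dif_neg (by omega)]
    simp [List.drop_eq_nil_of_le hlen, pvMaskGo, pvAnyIdx]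
  | succ k ih =>
    intro i dp db dc instr inbt hk hst
    by_cases hi : i < cs.length
    case neg =>
      rw [pvLoopA, dif_neg hi]
      simp [List.drop_eq_nil_of_le (Nat.le_of_not_lt hi), pvMaskGo, pvAnyIdx]
    case pos =>
      have hdrop : cs.drop i = cs[i] :: cs.drop (i+1) := List.drop_eq_getElem_cons hi
      rw [pvLoopA]
      simp only [dif_pos hi]
      rw [hdrop]
      generalize cs[i] = c
      cases instr with
      | true =>
        have hnb : inbt = false := by rcases hst with h | h <;> simp_all
        subst hnb
        by_cases hq : c = '\''
        · subst hq
          by_cases hla : cs[i+1]? = some '\''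
          · -- '' escape: advance two, stay in string
            have hi1 : i + 1 < cs.length := by
              by_contra hge
              simp [List.getElem?_eq_none (by omega : cs.length ≤ i+1)] at hla
            have hdrop1 : cs.drop (i+1) = '\'' :: cs.drop (i+2) := by
              rw [List.drop_eq_getElem_cons hi1]; simp_all
            rw [ih (i+2) dp db dc true false (by omega) (Or.inr rfl)]
            simp [hla, hdrop1, pvMaskGo, pvMaskStep, pvAnyIdx, pvModeOf]
          · -- the quote closes the string
            rw [ih (i+1) dp db dc false false (by omega) (Or.inl rfl)]
            have hhead : (cs.drop (i+1)).head? ≠ some '\'' := by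
              rw [List.head?_drop]; exact hla
            simp [hla, pvMaskGo, pvMaskStep, pvAnyIdx, pvModeOf,
              pvMaskGo_two_eq_zero _ _ _ _ hhead]
        · -- ordinary char inside the string
          rw [ih (i+1) dp db dc true false (by omega) (Or.inr rfl)]
          simp [hq, pvMaskGo, pvMaskStep, pvAnyIdx, pvModeOf]
      | false =>
        cases inbt with
        | true =>
          by_cases hb : c = '`'
          · subst hb
            rw [ih (i+1) dp db dc false false (by omega) (Or.inl rfl)]
            simp [pvMaskGo, pvMaskStep, pvAnyIdx, pvModeOf]
          · rw [ih (i+1) dp db dc false true (by omega) (Or.inl rfl)]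
            simp [hb, pvMaskGo, pvMaskStep, pvAnyIdx, pvModeOf]
        | false =>
          by_cases hq : c = '\''
          · subst hq
            rw [ih (i+1) dp db dc true false (by omega) (Or.inr rfl)]
            simp [pvMaskGo, pvMaskStep, pvCodeStep, pvAnyIdx, pvModeOf]
          · by_cases hb : c = '`'
            · subst hb
              rw [ih (i+1) dp db dc false true (by omega) (Or.inl rfl)]
              simp [pvMaskGo, pvMaskStep, pvCodeStep, pvAnyIdx, pvModeOf]
            · -- depth update and top-level keyword check
              rw [ih (i+1)
                (if c == '(' then dp + 1 else if c == ')' then max 0 (dp - 1) else dp)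
                (if c == '[' then db + 1 else if c == ']' then max 0 (db - 1) else db)
                (if c == '{' then dc + 1 else if c == '}' then max 0 (dc - 1) else dc)
                false false (by omega) (Or.inl rfl)]
              clear ih hst hdrop hk
              simp only [pvMaskGo, pvMaskStep, pvCodeStep, pvModeOf, pvAnyIdx]
              split <;> simp_all [Bool.beq_eq_decide_eq]

theorem pvMaskGo_length (s : Int × Int × Int × Int) (l : List Char) :
    (pvMaskGo s l).length = l.length := by
  induction l generalizing s with
  | nil => rfl
  | cons c rest ih => simp [pvMaskGo, ih]

-- ===== VERDICT (by name: the statement is the Claim_ definition above) =====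
theorem subquery_has_top_level_return_py_spec : Claim_equal_subquery_has_top_level_return_py := by
  intro text _
  unfold Spec_subquery_has_top_level_return_py
  unfold subquery_has_top_level_return_py subquery_has_top_level_return_py_alt
  simp only []
  rw [pvLoopA_eq_anyIdx text.toList (PySem.Chars.upper text.toList) text.toList.length 0
      0 0 0 false false (by omega) (Or.inl rfl)]
  rw [List.drop_zero]
  rw [pvAnyIdx_eq_range_any]
  simp [pvModeOf, pvMaskGo_length]
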